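-- pv_equiv track=rewrite | github.com/cuplv/WCET_via_EVT | Test-case-generation-Python-Programs/qsort_threeways.py | quickSortThreeways
-- ===== SOURCE A (Python) =====
-- def partition(a,l,r):
--    x, j, t = a[l], l, r
--    i = j
--
--    while i <= t :
--       if a[i] < x:
--          a[j], a[i] = a[i], a[j]
--          j += 1
--
--       elif a[i] > x:
--          a[t], a[i] = a[i], a[t]
--          t -= 1
--          i -= 1 # remain in the same i in this case
--       i += 1
--    return j, t
--
-- def quickSortIterative(arr,l,h):
--
--     # Create an auxiliary stack
--     size = h - l + 1
--     stack = [0] * (size)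
--
--     # initialize top of stack
--     top = -1
--
--     # push initial values of l and h to stack
--     top = top + 1
--     stack[top] = l
--     top = top + 1
--     stack[top] = h
--
--     # Keep popping from stack while is not empty
--     while top >= 0:
--
--         # Pop h and l
--         h = stack[top]
--         top = top - 1
--         l = stack[top]
--         top = top - 1
--
--         # Set pivot element at its correct position in
--         # sorted array
--         i,j = partition( arr, l, h )
--
--         # If there are elements on left side of pivot,
--         # then push left side to stack
--         if i-1 > l:
--             top = top + 1
--             stack[top] = l
--             top = top + 1
--             stack[top] = i-1
--
--         # If there are elements on right side of pivot,
--         # then push right side to stack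
--         if j+1 < h:
--             top = top + 1
--             stack[top] = j+1
--             top = top + 1
--             stack[top] = h
--
-- def quickSortThreeways(inp):
--     arr = []
--     for str in inp.split(" "):
--         try:
--             arr.append(int(str))
--         except ValueError:
--             pass
--     l = 0
--     h = len(arr)
--     if(h < 2):
--         return False
--     quickSortIterative(arr, l, h-1)
--     return True
-- ===== SOURCE B (Python) =====
-- def quickSortThreeways(inp):
--     count = 0
--     for tok in inp.split(" "):
--         try:
--             int(tok)
--         except ValueError:
--             continue
--         count += 1
--         if count >= 2:
--             return True
--     return False
-- ===== Notes on version B (the rewrite author's own statement) =====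
-- stated objective: simpler
-- what changed: B drops the entire iterative three-way quicksort (whose sorted array A discards) and decides the boolean in one scan: count tokens that parse as int and return True as soon as two are seen.
import Mathlib
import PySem

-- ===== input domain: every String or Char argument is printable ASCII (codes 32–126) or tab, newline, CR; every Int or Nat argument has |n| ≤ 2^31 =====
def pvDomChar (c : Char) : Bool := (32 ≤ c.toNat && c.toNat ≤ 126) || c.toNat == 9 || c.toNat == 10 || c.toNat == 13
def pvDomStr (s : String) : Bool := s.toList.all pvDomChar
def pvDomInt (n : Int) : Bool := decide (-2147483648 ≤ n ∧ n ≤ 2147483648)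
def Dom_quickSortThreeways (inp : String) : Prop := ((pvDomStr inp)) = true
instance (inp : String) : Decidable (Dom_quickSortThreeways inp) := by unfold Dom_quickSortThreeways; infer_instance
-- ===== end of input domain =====

-- B drops A's dead iterative three-way quicksort (its sorted array is discarded) and decides the
-- boolean by a single counting scan over the tokens; same return value on every input.


-- ===== PORT A =====
-- partition's while loop; state (a, x, j, t, i); fuel only makes the recursion structural
-- (each iteration either increases i or decreases t, so r-l+1 steps suffice; extra fuel is harmless).
def pvPartLoop : Nat → List Int → Int → Int → Int → Int → (List Int × Int × Int)
  | 0, a, _, j, t, _ => (a, j, t)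
  | fuel+1, a, x, j, t, i =>
    if i ≤ t then
      let ai := PySem.List.pyGetD a i 0
      if ai < x then
        let a' := PySem.List.pySetD (PySem.List.pySetD a j ai) i (PySem.List.pyGetD a j 0)
        pvPartLoop fuel a' x (j+1) t (i+1)
      else if ai > x then
        let a' := PySem.List.pySetD (PySem.List.pySetD a t ai) i (PySem.List.pyGetD a t 0)
        pvPartLoop fuel a' x j (t-1) ((i-1)+1)
      else pvPartLoop fuel a x j t (i+1)
    else (a, j, t)

def pvPartition (a : List Int) (l r : Int) : List Int × Int × Int :=
  pvPartLoop ((r - l).toNat + 1) a (PySem.List.pyGetD a l 0) l r l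

-- quickSortIterative's while loop over the explicit stack (generous fuel; the list is returned
-- in place of Python's in-place mutation; quickSortThreeways discards it, as Python discards arr).
def pvQsLoop : Nat → List Int → List Int → Int → List Int
  | 0, arr, _, _ => arr
  | fuel+1, arr, stack, top =>
    if top ≥ 0 then
      let h := PySem.List.pyGetD stack top 0
      let top := top - 1
      let l := PySem.List.pyGetD stack top 0
      let top := top - 1
      let r := pvPartition arr l h
      let arr := r.1
      let i := r.2.1
      let j := r.2.2
      let st1 := if i - 1 > l then
          (PySem.List.pySetD (PySem.List.pySetD stack (top+1) l) (top+2) (i-1), top+2)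
        else (stack, top)
      let st2 := if j + 1 < h then
          (PySem.List.pySetD (PySem.List.pySetD st1.1 (st1.2+1) (j+1)) (st1.2+2) h, st1.2+2)
        else st1
      pvQsLoop fuel arr st2.1 st2.2
    else arr

def pvQuickSortIterative (arr : List Int) (l h : Int) : List Int :=
  let size := h - l + 1
  let stack := List.replicate size.toNat (0 : Int)
  let stack := PySem.List.pySetD stack 0 l
  let stack := PySem.List.pySetD stack 1 h
  pvQsLoop (2 ^ (arr.length + 4)) arr stack 1

def quickSortThreeways (inp : String) : Bool :=
  let arr := ((PySem.Str.split? inp " ").getD []).foldl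
    (fun arr s => match PySem.Int.ofStr? s with | some n => arr ++ [n] | none => arr) []
  let l : Int := 0
  let h : Int := (arr.length : Int)
  if h < 2 then false
  else
    let _ := pvQuickSortIterative arr l (h - 1)
    true

-- ===== PORT B =====
-- Source B's loop: count tokens that parse as int, return True as soon as the count reaches 2.
def pvAltLoop : List String → Int → Bool
  | [], _ => false
  | tok :: rest, count =>
    match PySem.Int.ofStr? tok with
    | none => pvAltLoop rest count
    | some _ => if count + 1 ≥ 2 then true else pvAltLoop rest (count + 1)

def quickSortThreeways_alt (inp : String) : Bool :=
  pvAltLoop ((PySem.Str.split? inp " ").getD []) 0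

-- ===== PRECONDITION & SPEC =====
def Spec_quickSortThreeways (inp : String) (out : Bool) : Prop := out = quickSortThreeways_alt inp
instance (inp : String) (out : Bool) : Decidable (Spec_quickSortThreeways inp out) := by unfold Spec_quickSortThreeways; infer_instance

-- ===== CLAIM (what is proved, stated in full; the proofs are below) =====
def Claim_equal_quickSortThreeways : Prop := ∀ (inp : String), Dom_quickSortThreeways inp → Spec_quickSortThreeways inp (quickSortThreeways inp)

-- ===== LEMMAS AND PROOFS =====

-- A's parsed array has length = number of tokens int() accepts.
theorem pvFoldl_length (toks : List String) (acc : List Int) :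
    (toks.foldl (fun arr s => match PySem.Int.ofStr? s with | some n => arr ++ [n] | none => arr) acc).length
      = acc.length + toks.countP (fun s => (PySem.Int.ofStr? s).isSome) := by
  induction toks generalizing acc with
  | nil => simp
  | cons t rest ih =>
    cases h : PySem.Int.ofStr? t <;> simp [List.countP_cons, h, ih] <;> omega

-- B's loop computes exactly "count + (#accepted tokens) ≥ 2" when started at count ∈ {0,1}.
theorem pvAltLoop_eq (toks : List String) (c : Int) (h0 : 0 ≤ c) (h2 : c < 2) :
    pvAltLoop toks c = decide (2 ≤ c + (toks.countP (fun s => (PySem.Int.ofStr? s).isSome) : Int)) := by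
  induction toks generalizing c with
  | nil => simp [pvAltLoop]; omega
  | cons t rest ih =>
    cases h : PySem.Int.ofStr? t with
    | none => simp [pvAltLoop, h, List.countP_cons, ih c h0 h2]
    | some n =>
      by_cases hc : c + 1 ≥ 2
      · have : c = 1 := by omega
        subst this
        simp [pvAltLoop, h, List.countP_cons]
        omega
      · have := ih (c + 1) (by omega) (by omega)
        simp [pvAltLoop, h, hc, List.countP_cons, this]
        constructor <;> intro <;> omega

-- ===== VERDICT (by name: the statement is the Claim_ definition above) =====
theorem quickSortThreeways_spec : Claim_equal_quickSortThreeways := by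
  intro inp _
  unfold Spec_quickSortThreeways quickSortThreeways quickSortThreeways_alt
  set toks := (PySem.Str.split? inp " ").getD [] with htoks
  have hlen := pvFoldl_length toks []
  have halt := pvAltLoop_eq toks 0 (by omega) (by omega)
  simp only [List.length_nil, Nat.zero_add] at hlen
  rw [halt]
  show (if ((toks.foldl (fun arr s => match PySem.Int.ofStr? s with | some n => arr ++ [n] | none => arr) []).length : Int) < 2 then false else true)
      = decide (2 ≤ 0 + (toks.countP (fun s => (PySem.Int.ofStr? s).isSome) : Int))
  rw [hlen]
  by_cases hlt : toks.countP (fun s => (PySem.Int.ofStr? s).isSome) < 2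
  · rw [if_pos (by exact_mod_cast hlt)]
    simp; omega
  · rw [if_neg (by push_cast; omega)]
    simp; omega
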